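-- pv_equiv track=rewrite | github.com/drebman/BioinformaticsProject | compute_genome_stats.py | find_losses
-- ===== SOURCE A (Python) =====
-- def find_losses(aln_sym: str, aln_free: str) -> list[tuple[int, int]]:
--     free_pos = -1
--     losses, in_del, start = [], False, None
--     for a, b in zip(aln_sym, aln_free):
--         if b != "-":                       # advance along reference coordinate
--             free_pos += 1
--             if a == "-":                   # deletion in symbiont
--                 if not in_del:
--                     in_del = True; start = free_pos
--             else:
--                 if in_del:                 # close the deletion run
--                     losses.append((start, free_pos - 1))
--                     in_del = False
--     if in_del:
--         losses.append((start, free_pos))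
--     return losses
-- ===== SOURCE B (Python) =====
-- def find_losses(aln_sym: str, aln_free: str) -> list[tuple[int, int]]:
--     # Pass 1: map every deletion column to its reference coordinate.
--     del_coords = []
--     free_pos = -1
--     for a, b in zip(aln_sym, aln_free):
--         if b != "-":
--             free_pos += 1
--             if a == "-":
--                 del_coords.append(free_pos)
--     # Pass 2: group maximal runs of consecutive coordinates.
--     runs = []
--     cur = None                      # (start, prev) of the open run
--     for c in del_coords:
--         if cur is None:
--             cur = (c, c)
--         elif c == cur[1] + 1:
--             cur = (cur[0], c)
--         else:
--             runs.append(cur)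
--             cur = (c, c)
--     if cur is not None:
--         runs.append(cur)
--     return runs
-- ===== Notes on version B (the rewrite author's own statement) =====
-- stated objective: alternative
-- what changed: Splits A's single stateful scan into two passes: one maps deletion columns to reference coordinates, the other groups maximal runs of consecutive coordinates.
import Mathlib
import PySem

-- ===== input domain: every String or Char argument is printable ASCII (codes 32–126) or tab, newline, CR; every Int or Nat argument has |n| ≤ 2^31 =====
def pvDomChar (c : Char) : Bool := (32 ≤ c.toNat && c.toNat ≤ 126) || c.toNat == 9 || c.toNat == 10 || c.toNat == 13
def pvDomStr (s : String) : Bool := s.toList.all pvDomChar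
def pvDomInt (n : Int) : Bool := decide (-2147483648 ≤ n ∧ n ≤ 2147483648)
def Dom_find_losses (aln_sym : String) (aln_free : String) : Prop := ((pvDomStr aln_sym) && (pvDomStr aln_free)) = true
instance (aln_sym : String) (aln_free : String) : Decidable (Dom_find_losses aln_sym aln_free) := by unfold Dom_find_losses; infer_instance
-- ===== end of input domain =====

-- B replaces A's single stateful scan by two passes (coordinate mapping, then consecutive-run grouping); alternative decomposition, same cost.


-- ===== PORT A =====
-- A's for-loop: state (free_pos, losses, in_del, start); after the loop, flush the open run.
-- `start` is Option Int (Python's None); Python only reads it when in_del, hence it is some _ there;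
-- .getD 0 is never the value actually used.
def lossLoop : Int → List (Int × Int) → Bool → Option Int → List (Char × Char) → List (Int × Int)
  | fp, losses, in_del, start, [] =>
      if in_del then losses ++ [(start.getD 0, fp)] else losses
  | fp, losses, in_del, start, (a, b) :: rest =>
      if b ≠ '-' then
        if a = '-' then
          if ¬ in_del then lossLoop (fp + 1) losses true (some (fp + 1)) rest
          else lossLoop (fp + 1) losses in_del start rest
        else
          if in_del then lossLoop (fp + 1) (losses ++ [(start.getD 0, fp + 1 - 1)]) false start rest
          else lossLoop (fp + 1) losses in_del start rest
      else lossLoop fp losses in_del start rest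

def find_losses (aln_sym : String) (aln_free : String) : List (Int × Int) :=
  lossLoop (-1) [] false none (List.zip aln_sym.toList aln_free.toList)

-- ===== PORT B =====
-- Pass 1: reference coordinate of every deletion column.
def coordsLoop : Int → List Int → List (Char × Char) → List Int
  | _, acc, [] => acc
  | fp, acc, (a, b) :: rest =>
      if b ≠ '-' then
        if a = '-' then coordsLoop (fp + 1) (acc ++ [fp + 1]) rest
        else coordsLoop (fp + 1) acc rest
      else coordsLoop fp acc rest

-- Pass 2: group maximal runs of consecutive integers; cur is the open run (start, prev).
def groupLoop : List (Int × Int) → Option (Int × Int) → List Int → List (Int × Int)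
  | runs, cur, [] => match cur with | none => runs | some se => runs ++ [se]
  | runs, none, c :: rest => groupLoop runs (some (c, c)) rest
  | runs, some (s, e), c :: rest =>
      if c = e + 1 then groupLoop runs (some (s, c)) rest
      else groupLoop (runs ++ [(s, e)]) (some (c, c)) rest

def find_losses_alt (aln_sym : String) (aln_free : String) : List (Int × Int) :=
  groupLoop [] none (coordsLoop (-1) [] (List.zip aln_sym.toList aln_free.toList))

-- ===== PRECONDITION & SPEC =====
def Spec_find_losses (aln_sym : String) (aln_free : String) (out : List (Int × Int)) : Prop := out = find_losses_alt aln_sym aln_free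
instance (aln_sym : String) (aln_free : String) (out : List (Int × Int)) : Decidable (Spec_find_losses aln_sym aln_free out) := by unfold Spec_find_losses; infer_instance

-- ===== CLAIM (what is proved, stated in full; the proofs are below) =====
def Claim_equal_find_losses : Prop := ∀ (aln_sym : String) (aln_free : String), Dom_find_losses aln_sym aln_free → Spec_find_losses aln_sym aln_free (find_losses aln_sym aln_free)

-- ===== LEMMAS AND PROOFS =====

lemma coordsLoop_acc (zs : List (Char × Char)) : ∀ (fp : Int) (acc : List Int),
    coordsLoop fp acc zs = acc ++ coordsLoop fp [] zs := by
  induction zs with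
  | nil => intro fp acc; simp [coordsLoop]
  | cons hd tl ih =>
      intro fp acc
      obtain ⟨a, b⟩ := hd
      by_cases hb : b = '-'
      · simp only [coordsLoop, hb, ne_eq, not_true_eq_false, ite_false]
        exact ih fp acc
      · by_cases ha : a = '-'
        · simp only [coordsLoop, hb, ha, ne_eq, not_false_iff, ite_true]
          simp only [List.nil_append]
          rw [ih (fp + 1) (acc ++ [fp + 1]), ih (fp + 1) [fp + 1], List.append_assoc]
        · simp only [coordsLoop, hb, ha, ne_eq, not_false_iff, ite_true, ite_false]
          exact ih (fp + 1) acc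

lemma coordsLoop_cons_del (a b : Char) (tl : List (Char × Char)) (fp : Int)
    (hb : b ≠ '-') (ha : a = '-') :
    coordsLoop fp [] ((a, b) :: tl) = (fp + 1) :: coordsLoop (fp + 1) [] tl := by
  simp only [coordsLoop, hb, ha, if_pos, ne_eq, not_false_iff,
    List.nil_append]
  rw [coordsLoop_acc]; rfl

lemma coordsLoop_gt (zs : List (Char × Char)) : ∀ (fp : Int) (c : Int),
    c ∈ coordsLoop fp [] zs → fp < c := by
  induction zs with
  | nil => intro fp c h; simp [coordsLoop] at h
  | cons hd tl ih =>
      intro fp c h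
      obtain ⟨a, b⟩ := hd
      by_cases hb : b = '-'
      · simp only [coordsLoop, hb, ne_eq, not_true_eq_false, ite_false] at h
        exact ih fp c h
      · by_cases ha : a = '-'
        · rw [coordsLoop_cons_del a b tl fp hb ha] at h
          simp only [List.mem_cons] at h
          rcases h with h | h
          · omega
          · have := ih (fp + 1) c h; omega
        · simp only [coordsLoop, hb, ha, ne_eq, not_false_iff, ite_true, ite_false] at h
          exact lt_trans (by omega) (ih (fp + 1) c h)

-- If every remaining coordinate jumps past e + 1, the open run (s, e) can be flushed now.
lemma groupLoop_flush (runs : List (Int × Int)) (s e : Int) (l : List Int)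
    (h : ∀ c ∈ l, e + 1 < c) :
    groupLoop runs (some (s, e)) l = groupLoop (runs ++ [(s, e)]) none l := by
  cases l with
  | nil => simp [groupLoop]
  | cons c rest =>
      have hc : c ≠ e + 1 := by have := h c (by simp); omega
      simp [groupLoop, hc]

lemma key (zs : List (Char × Char)) : ∀ (fp : Int) (losses : List (Int × Int)),
    (∀ (s : Int),
      lossLoop fp losses true (some s) zs = groupLoop losses (some (s, fp)) (coordsLoop fp [] zs)) ∧
    (∀ (st : Option Int),
      lossLoop fp losses false st zs = groupLoop losses none (coordsLoop fp [] zs)) := by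
  induction zs with
  | nil =>
      intro fp losses
      constructor
      · intro s; simp [lossLoop, coordsLoop, groupLoop]
      · intro st; simp [lossLoop, coordsLoop, groupLoop]
  | cons hd tl ih =>
      intro fp losses
      obtain ⟨a, b⟩ := hd
      constructor
      · intro s
        by_cases hb : b = '-'
        · simp [lossLoop, coordsLoop, hb]
          exact (ih fp losses).1 s
        · by_cases ha : a = '-'
          · -- run continues: coordinate fp+1 extends (s, fp)
            rw [coordsLoop_cons_del a b tl fp hb ha]
            simp only [lossLoop, hb, ha, ne_eq, not_false_iff, ite_true, groupLoop]
            exact (ih (fp + 1) losses).1 s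
          · -- run closes at fp; next coordinates are > fp+1
            have hgt : ∀ c ∈ coordsLoop (fp + 1) [] tl, fp + 1 < c :=
              fun c hc => coordsLoop_gt tl (fp + 1) c hc
            simp [lossLoop, coordsLoop, hb, ha]
            rw [groupLoop_flush losses s fp _ (fun c hc => by have := hgt c hc; omega)]
            exact (ih (fp + 1) (losses ++ [(s, fp)])).2 (some s)
      · intro st
        by_cases hb : b = '-'
        · simp [lossLoop, coordsLoop, hb]
          exact (ih fp losses).2 st
        · by_cases ha : a = '-'
          · -- open a new run at fp+1
            rw [coordsLoop_cons_del a b tl fp hb ha]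
            simp only [lossLoop, hb, ha, ne_eq, not_false_iff, ite_true, groupLoop]
            exact (ih (fp + 1) losses).1 (fp + 1)
          · simp [lossLoop, coordsLoop, hb, ha]
            exact (ih (fp + 1) losses).2 st

-- ===== VERDICT (by name: the statement is the Claim_ definition above) =====
theorem find_losses_spec : Claim_equal_find_losses := by
  intro aln_sym aln_free _
  unfold Spec_find_losses find_losses find_losses_alt
  exact (key _ (-1) []).2 none
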